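-- pv_equiv track=rewrite | github.com/DanielDuda260802/Slozene_zavrsni | Najkraci_putevi/2.rok_23_24.py | matrix_to_edges
-- ===== SOURCE A (Python) =====
-- def matrix_to_edges(matrix):
--     edges = {}
--     for i, row in enumerate(matrix):
--         edge_key = (row[0],row[1])
--         if edge_key not in edges:
--             edges[row[0],row[1]] = row[2]
--         elif edges[edge_key] > row[2]:
--             edges[edge_key] = row[2]
--     return edges
-- ===== SOURCE B (Python) =====
-- def matrix_to_edges(matrix):
--     # pass 1: group all weights by endpoint pair, in first-occurrence order
--     groups = {}
--     for row in matrix: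
--         groups.setdefault((row[0], row[1]), []).append(row[2])
--     # pass 2: reduce each group to its minimum (seed with first, keep-old on ties)
--     edges = {}
--     for key, weights in groups.items():
--         best = weights[0]
--         for w in weights[1:]:
--             if best > w:
--                 best = w
--         edges[key] = best
--     return edges
-- ===== Notes on version B (the rewrite author's own statement) =====
-- stated objective: alternative
-- what changed: replaces A's interleaved scan-and-update of the result dict by a two-pass build-index-then-reduce: first group all weights per (u,v) pair into lists, then reduce each list to its minimum with the same keep-old '>' comparison
import Mathlib
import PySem

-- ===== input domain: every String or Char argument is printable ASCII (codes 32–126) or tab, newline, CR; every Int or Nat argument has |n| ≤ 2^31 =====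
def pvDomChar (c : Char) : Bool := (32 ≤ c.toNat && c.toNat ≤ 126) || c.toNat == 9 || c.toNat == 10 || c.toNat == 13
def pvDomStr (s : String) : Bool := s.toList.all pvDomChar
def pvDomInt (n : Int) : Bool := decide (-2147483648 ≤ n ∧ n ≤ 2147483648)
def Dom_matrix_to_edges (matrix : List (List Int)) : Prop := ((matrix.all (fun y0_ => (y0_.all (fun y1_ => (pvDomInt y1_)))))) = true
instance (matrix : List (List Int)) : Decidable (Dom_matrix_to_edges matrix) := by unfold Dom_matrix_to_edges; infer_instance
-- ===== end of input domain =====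

-- B replaces A's interleaved scan-and-update by a two-pass grouping (index all weights per pair, then reduce each group); alternative decomposition, same cost.


-- ===== PORT A =====
-- one iteration of A's loop body (row index from enumerate is unused, as in A)
def mtoeStepA (edges : PySem.Dict (Int × Int) Int) (row : List Int) : PySem.Dict (Int × Int) Int :=
  let edge_key : Int × Int := (PySem.List.pyGetD row 0 0, PySem.List.pyGetD row 1 0)
  if edges.contains edge_key = false then
    edges.insert edge_key (PySem.List.pyGetD row 2 0)
  else if edges.getD edge_key 0 > PySem.List.pyGetD row 2 0 then
    edges.insert edge_key (PySem.List.pyGetD row 2 0)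
  else edges

def matrix_to_edges (matrix : List (List Int)) : List (Int × Int × Int) :=
  let edges := (PySem.List.enumerate matrix).foldl (fun edges p => mtoeStepA edges p.2) PySem.Dict.empty
  edges.items.map (fun p => (p.1.1, p.1.2, p.2))

-- ===== PORT B =====
-- pass 1 body: groups.setdefault((row[0],row[1]), []).append(row[2])
def mtoeGroupStep (g : PySem.Dict (Int × Int) (List Int)) (row : List Int) : PySem.Dict (Int × Int) (List Int) :=
  let k : Int × Int := (PySem.List.pyGetD row 0 0, PySem.List.pyGetD row 1 0)
  g.insert k (g.getD k [] ++ [PySem.List.pyGetD row 2 0])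

-- pass 2 inner reduction: best = weights[0]; for w in weights[1:]: if best > w: best = w
def mtoeRed (weights : List Int) : Int :=
  match weights with
  | [] => 0   -- unreachable: every group is built nonempty
  | b :: rest => rest.foldl (fun best w => if best > w then w else best) b

def matrix_to_edges_alt (matrix : List (List Int)) : List (Int × Int × Int) :=
  let groups := matrix.foldl mtoeGroupStep PySem.Dict.empty
  let edges := groups.items.foldl
    (fun (e : PySem.Dict (Int × Int) Int) p => e.insert p.1 (mtoeRed p.2)) PySem.Dict.empty
  edges.items.map (fun p => (p.1.1, p.1.2, p.2))

-- ===== PRECONDITION & SPEC =====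
-- Pre_ excludes exactly the inputs on which A raises IndexError: a row shorter than 3.
def Pre_matrix_to_edges (matrix : List (List Int)) : Prop := ∀ row ∈ matrix, 3 ≤ row.length
instance (matrix : List (List Int)) : Decidable (Pre_matrix_to_edges matrix) := by unfold Pre_matrix_to_edges; infer_instance
def pvWitness_matrix_to_edges : List (List Int) := [[1, 2, 5], [1, 2, 3], [2, 3, 4]]

def Spec_matrix_to_edges (matrix : List (List Int)) (out : List (Int × Int × Int)) : Prop := out = matrix_to_edges_alt matrix
instance (matrix : List (List Int)) (out : List (Int × Int × Int)) : Decidable (Spec_matrix_to_edges matrix out) := by unfold Spec_matrix_to_edges; infer_instance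

-- ===== CLAIM (what is proved, stated in full; the proofs are below) =====
def Claim_equal_matrix_to_edges : Prop := ∀ (matrix : List (List Int)), Dom_matrix_to_edges matrix → Pre_matrix_to_edges matrix → Spec_matrix_to_edges matrix (matrix_to_edges matrix)

-- ===== LEMMAS AND PROOFS =====

-- B's groups dict with every value-list reduced, position for position
def mtoeMapVals (g : PySem.Dict (Int × Int) (List Int)) : PySem.Dict (Int × Int) Int :=
  PySem.Dict.mk (g.items.map (fun p => (p.1, mtoeRed p.2)))

theorem mtoe_get?_mapVals (l : List ((Int × Int) × List Int)) (k : Int × Int) :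
    (mtoeMapVals (PySem.Dict.mk l)).get? k = ((PySem.Dict.mk l).get? k).map mtoeRed := by
  induction l with
  | nil => rfl
  | cons p rest ih =>
    simp only [mtoeMapVals, List.map_cons] at ih ⊢
    rw [PySem.Dict.get?_mk_cons, PySem.Dict.get?_mk_cons]
    by_cases h : (p.1 == k) = true
    · simp [h]
    · simp only [h, Option.map]
      exact ih

theorem mtoe_red_append (b : Int) (rest : List Int) (w : Int) :
    mtoeRed ((b :: rest) ++ [w]) =
      if mtoeRed (b :: rest) > w then w else mtoeRed (b :: rest) := by
  simp [mtoeRed, List.foldl_append]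

-- the per-row step of A commutes with reducing B's groups
theorem mtoe_step_comm (g : PySem.Dict (Int × Int) (List Int)) (row : List Int)
    (hnd : g.keys.Nodup) (hne : ∀ p ∈ g.items, p.2 ≠ []) :
    mtoeStepA (mtoeMapVals g) row = mtoeMapVals (mtoeGroupStep g row) := by
  set k : Int × Int := (PySem.List.pyGetD row 0 0, PySem.List.pyGetD row 1 0) with hk
  set w : Int := PySem.List.pyGetD row 2 0 with hw
  obtain ⟨l⟩ := g
  have hget := mtoe_get?_mapVals l k
  have hcont : (mtoeMapVals (PySem.Dict.mk l)).contains k = (PySem.Dict.mk l).contains k := by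
    rw [PySem.Dict.contains_eq_isSome_get?, PySem.Dict.contains_eq_isSome_get?, hget]
    cases (PySem.Dict.mk l).get? k <;> rfl
  by_cases hc : (PySem.Dict.mk l).contains k = true
  · -- key present: both overwrite in place
    obtain ⟨ws, hws⟩ : ∃ ws, (PySem.Dict.mk l).get? k = some ws := by
      rw [PySem.Dict.contains_eq_isSome_get?] at hc
      exact Option.isSome_iff_exists.mp hc
    have hmem : (k, ws) ∈ l := PySem.Dict.mem_items_of_get?_eq_some _ hws
    obtain ⟨b, rest, rfl⟩ : ∃ b rest, ws = b :: rest := by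
      cases ws with
      | nil => exact absurd rfl (hne _ hmem)
      | cons b rest => exact ⟨b, rest, rfl⟩
    have huniq : ∀ p ∈ l, p.1 = k → p.2 = b :: rest := by
      intro p hp hpk
      have h1 : (PySem.Dict.mk l).get? p.1 = some p.2 := by
        rcases p with ⟨pk, pv⟩
        exact PySem.Dict.get?_of_mem_items _ hp hnd
      rw [hpk, hws] at h1
      exact (Option.some.injEq _ _ ▸ h1).symm
    have hgd : (PySem.Dict.mk l).getD k [] = b :: rest := by
      simp [PySem.Dict.getD, hws]
    have hgdA : (mtoeMapVals (PySem.Dict.mk l)).getD k 0 = mtoeRed (b :: rest) := by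
      simp [PySem.Dict.getD, hget, hws]
    have hcontM : (mtoeMapVals (PySem.Dict.mk l)).contains k = true := by rw [hcont]; exact hc
    unfold mtoeStepA mtoeGroupStep
    simp only [← hk, ← hw, hcontM, hgdA, hgd, Bool.true_eq_false, if_false]
    by_cases hlt : mtoeRed (b :: rest) > w
    · rw [if_pos hlt]
      apply PySem.Dict.ext
      simp only [mtoeMapVals] at hcontM ⊢
      rw [PySem.Dict.items_insert_of_contains _ _ hcontM, PySem.Dict.items_insert_of_contains _ _ hc]
      simp only [List.map_map]
      apply List.map_congr_left
      intro p hp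
      by_cases hpk : p.1 = k
      · have hb : (p.1 == k) = true := beq_iff_eq.mpr hpk
        simp only [Function.comp, hb, if_true]
        rw [mtoe_red_append, if_pos hlt]
      · have hb : (p.1 == k) = false := beq_eq_false_iff_ne.mpr hpk
        simp [Function.comp, hb]
    · rw [if_neg hlt]
      apply PySem.Dict.ext
      simp only [mtoeMapVals]
      rw [PySem.Dict.items_insert_of_contains _ _ hc]
      simp only [List.map_map]
      symm
      apply List.map_congr_left
      intro p hp
      by_cases hpk : p.1 = k
      · have hb : (p.1 == k) = true := beq_iff_eq.mpr hpk
        have h2 := huniq p hp hpk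
        simp only [Function.comp, hb, if_true]
        rw [mtoe_red_append, if_neg hlt, hpk, h2]
      · have hb : (p.1 == k) = false := beq_eq_false_iff_ne.mpr hpk
        simp [Function.comp, hb]
  · -- key absent: both append
    have hcF : (PySem.Dict.mk l).contains k = false := by
      cases h : (PySem.Dict.mk l).contains k
      · rfl
      · exact absurd h hc
    have hcontM : (mtoeMapVals (PySem.Dict.mk l)).contains k = false := by rw [hcont]; exact hcF
    have hgd : (PySem.Dict.mk l).getD k [] = [] := PySem.Dict.getD_of_not_contains _ _ hcF
    unfold mtoeStepA mtoeGroupStep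
    simp only [← hk, ← hw, hcontM, if_true]
    apply PySem.Dict.ext
    simp only [mtoeMapVals] at hcontM ⊢
    rw [hgd, PySem.Dict.items_insert_of_not_contains _ _ hcontM,
        PySem.Dict.items_insert_of_not_contains _ _ hcF]
    simp [mtoeRed]

-- the group step keeps keys unique and value-lists nonempty
theorem mtoe_groupStep_nodup (g : PySem.Dict (Int × Int) (List Int)) (row : List Int)
    (hnd : g.keys.Nodup) : (mtoeGroupStep g row).keys.Nodup := by
  unfold mtoeGroupStep
  exact PySem.Dict.nodup_keys_insert _ _ _ hnd

theorem mtoe_groupStep_ne (g : PySem.Dict (Int × Int) (List Int)) (row : List Int)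
    (hne : ∀ p ∈ g.items, p.2 ≠ []) : ∀ p ∈ (mtoeGroupStep g row).items, p.2 ≠ [] := by
  intro p hp
  unfold mtoeGroupStep at hp
  rcases (PySem.Dict.mem_items_insert _ _ _ _).mp hp with h | ⟨h, _⟩
  · subst h; simp
  · exact hne _ h

-- A's whole loop equals B's grouping loop followed by reduction
theorem mtoe_fold_comm (rows : List (List Int)) (g : PySem.Dict (Int × Int) (List Int))
    (hnd : g.keys.Nodup) (hne : ∀ p ∈ g.items, p.2 ≠ []) :
    rows.foldl mtoeStepA (mtoeMapVals g) = mtoeMapVals (rows.foldl mtoeGroupStep g) := by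
  induction rows generalizing g with
  | nil => rfl
  | cons row rows ih =>
    simp only [List.foldl_cons]
    rw [mtoe_step_comm g row hnd hne]
    exact ih _ (mtoe_groupStep_nodup g row hnd) (mtoe_groupStep_ne g row hne)

-- A's enumerate loop ignores the index
theorem mtoe_foldl_enumerate (rows : List (List Int)) (s : Int) (e : PySem.Dict (Int × Int) Int) :
    (PySem.List.enumerate rows s).foldl (fun e p => mtoeStepA e p.2) e = rows.foldl mtoeStepA e := by
  induction rows generalizing s e with
  | nil => rfl
  | cons row rows ih => rw [PySem.List.enumerate_cons]; simp only [List.foldl_cons]; exact ih _ _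

theorem mtoe_groups_nodup (matrix : List (List Int)) :
    (matrix.foldl mtoeGroupStep PySem.Dict.empty).keys.Nodup := by
  have h : ∀ (rows : List (List Int)) (g : PySem.Dict (Int × Int) (List Int)),
      g.keys.Nodup → (rows.foldl mtoeGroupStep g).keys.Nodup := by
    intro rows
    induction rows with
    | nil => intro g hg; exact hg
    | cons r rs ih => intro g hg; exact ih _ (mtoe_groupStep_nodup g r hg)
  exact h matrix _ PySem.Dict.nodup_keys_empty

-- ===== VERDICT (by name: the statement is the Claim_ definition above) =====
theorem matrix_to_edges_spec : Claim_equal_matrix_to_edges := by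
  intro matrix _ _
  unfold Spec_matrix_to_edges
  have hA : matrix.foldl mtoeStepA PySem.Dict.empty
      = mtoeMapVals (matrix.foldl mtoeGroupStep PySem.Dict.empty) := by
    have h0 : (PySem.Dict.empty : PySem.Dict (Int × Int) Int)
        = mtoeMapVals (PySem.Dict.empty : PySem.Dict (Int × Int) (List Int)) := rfl
    rw [h0]
    exact mtoe_fold_comm matrix _ PySem.Dict.nodup_keys_empty
      (by intro p hp; simp [PySem.Dict.empty] at hp)
  have hB : ((matrix.foldl mtoeGroupStep PySem.Dict.empty).items.foldl
      (fun (e : PySem.Dict (Int × Int) Int) p => e.insert p.1 (mtoeRed p.2)) PySem.Dict.empty).items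
      = (matrix.foldl mtoeGroupStep PySem.Dict.empty).items.map (fun a => (a.1, mtoeRed a.2)) := by
    have hnd := mtoe_groups_nodup matrix
    simp only [PySem.Dict.keys] at hnd
    have h := PySem.Dict.items_foldl_insert_fresh
      ((matrix.foldl mtoeGroupStep PySem.Dict.empty).items) (fun p => p.1) (fun p => mtoeRed p.2)
      PySem.Dict.empty (by intro a _; exact PySem.Dict.contains_empty _) hnd
    simpa using h
  simp only [matrix_to_edges, matrix_to_edges_alt, mtoe_foldl_enumerate, hA, hB, mtoeMapVals,
    List.map_map]
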